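-- pv_equiv track=rewrite | github.com/AdamZhouSE/pythonHomework | Code/CodeRecords/2635/60602/280899.py | examZero
-- ===== SOURCE A (Python) =====
-- def examZero(string):
--     i=len(string)-1;
--     count=0;
--     while(i>=0):
--         if(string[i]=='0'):
--             count+=1;
--         else:
--             break;
--         i-=1;
--     return count;
-- ===== SOURCE B (Python) =====
-- def examZero(string):
--     run = 0
--     for ch in string:
--         run = run + 1 if ch == '0' else 0
--     return run
-- ===== Notes on version B (the rewrite author's own statement) =====
-- stated objective: alternative
-- what changed: Replaces A's backward scan-and-break from the end of the string by a single forward pass maintaining a run counter of consecutive zero characters that resets on every non-zero character; the counter's final value is the trailing-zero run length.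
import Mathlib
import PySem

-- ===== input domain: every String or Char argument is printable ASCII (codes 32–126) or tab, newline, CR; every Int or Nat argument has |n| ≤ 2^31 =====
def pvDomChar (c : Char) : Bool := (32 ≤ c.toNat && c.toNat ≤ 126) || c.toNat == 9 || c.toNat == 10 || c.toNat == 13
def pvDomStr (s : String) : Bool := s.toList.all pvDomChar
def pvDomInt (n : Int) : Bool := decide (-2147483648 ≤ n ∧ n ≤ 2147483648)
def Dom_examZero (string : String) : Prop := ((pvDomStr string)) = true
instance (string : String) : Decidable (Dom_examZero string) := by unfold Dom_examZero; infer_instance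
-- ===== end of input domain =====

-- B replaces A's backward scan-and-break loop by one forward pass keeping a
-- run counter of consecutive '0's that resets on every non-'0' character.


-- ===== PORT A =====
-- A's while loop: i runs from len-1 downwards; the fuel argument n means i = n-1,
-- so n = 0 is the i < 0 exit.  string[i] is always in range here, so pyGet?'s
-- getD default is never used (exact).
def examZeroLoop (cs : List Char) : Nat → Int → Int
  | 0, count => count
  | n + 1, count =>
      if (PySem.List.pyGet? cs (n : Int)).getD ' ' == '0' then
        examZeroLoop cs n (count + 1)
      else count

def examZero (string : String) : Int :=
  examZeroLoop string.toList string.toList.length 0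

-- ===== PORT B =====
-- B's forward for-loop over the characters: a fold carrying the run counter.
def examZero_alt (string : String) : Int :=
  string.toList.foldl (fun run ch => if ch == '0' then run + 1 else 0) 0

-- ===== PRECONDITION & SPEC =====
def Spec_examZero (string : String) (out : Int) : Prop := out = examZero_alt string
instance (string : String) (out : Int) : Decidable (Spec_examZero string out) := by unfold Spec_examZero; infer_instance

-- ===== CLAIM (what is proved, stated in full; the proofs are below) =====
def Claim_equal_examZero : Prop := ∀ (string : String), Dom_examZero string → Spec_examZero string (examZero string)

-- ===== LEMMAS AND PROOFS =====

-- indices below ds.length never see the appended element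
theorem examZeroLoop_append (ds : List Char) (x : Char) :
    ∀ n c, n ≤ ds.length → examZeroLoop (ds ++ [x]) n c = examZeroLoop ds n c := by
  intro n
  induction n with
  | zero => intro c _; rfl
  | succ m ih =>
      intro c hm
      have hlt : m < ds.length := Nat.lt_of_succ_le hm
      have hget : PySem.List.pyGet? (ds ++ [x]) (m : Int) = PySem.List.pyGet? ds (m : Int) := by
        simp [PySem.List.pyGet?_natCast, List.getElem?_append_left hlt]
      simp only [examZeroLoop, hget]
      split
      · exact ih _ (Nat.le_of_lt hlt)
      · rfl

-- A's loop counts the trailing run of '0' (plus the accumulator)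
theorem examZeroLoop_eq (cs : List Char) :
    ∀ c, examZeroLoop cs cs.length c = c + ((cs.reverse.takeWhile (· == '0')).length : Int) := by
  induction cs using List.reverseRecOn with
  | nil => intro c; simp [examZeroLoop]
  | append_singleton ds x ih =>
      intro c
      have hget : PySem.List.pyGet? (ds ++ [x]) ((ds.length : Nat) : Int) = some x := by
        simp
      simp only [List.length_append, List.length_singleton, examZeroLoop, hget, Option.getD_some]
      by_cases hx : x = '0'
      · subst hx
        rw [if_pos (by simp), examZeroLoop_append ds _ _ _ (le_refl _), ih]
        simp
        ring
      · rw [if_neg (by simpa using hx)]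
        simp [hx]

-- B's fold: all-zero lists accumulate, any non-'0' resets to the trailing run
theorem examZeroFold_eq (cs : List Char) :
    ∀ a : Int, cs.foldl (fun run ch => if ch == '0' then run + 1 else 0) a
      = if cs.all (· == '0') then a + (cs.length : Int)
        else ((cs.reverse.takeWhile (· == '0')).length : Int) := by
  induction cs using List.reverseRecOn with
  | nil => intro a; simp
  | append_singleton ds x ih =>
      intro a
      rw [List.foldl_append]
      by_cases hx : x = '0'
      · subst hx
        simp only [List.foldl_cons, List.foldl_nil, if_pos (by simp : ('0' == '0') = true)]
        rw [ih]
        by_cases hall : ds.all (· == '0')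
        · simp [hall]; ring
        · simp [hall]
      · have hxb : (x == '0') = false := by simpa using hx
        simp only [List.foldl_cons, List.foldl_nil, hxb, List.reverse_append,
          List.reverse_cons, List.reverse_nil, List.nil_append, List.singleton_append,
          List.all_append, List.all_cons, List.all_nil]
        rw [List.takeWhile_cons_of_neg (by simp [hx])]
        simp

theorem examZero_spec : Claim_equal_examZero := by
  intro s _
  unfold Spec_examZero examZero examZero_alt
  rw [examZeroLoop_eq, examZeroFold_eq]
  by_cases hall : s.toList.all (· == '0')
  · have : s.toList.reverse.takeWhile (· == '0') = s.toList.reverse := by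
      apply List.takeWhile_eq_self_iff.mpr
      intro x hx
      exact List.all_eq_true.mp hall x (List.mem_reverse.mp hx)
    simp [hall, this]
  · simp [hall]
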